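-- pv_equiv track=rewrite | github.com/ruuffian/wordle-solver | main.py | uniqueness_score
-- ===== SOURCE A (Python) =====
-- def uniqueness_score(wordin):
--     score = 5
--     letters = {}
--     for i in range(0, 5):
--         if wordin[i] in letters.keys():
--             letters[wordin[i]] += 1
--             score -= 1
--         else:
--             letters[wordin[i]] = 1
--     return score
-- ===== SOURCE B (Python) =====
-- def uniqueness_score(wordin):
--     score = 0
--     for i in range(5):
--         if all(wordin[j] != wordin[i] for j in range(i)):
--             score += 1
--     return score
-- ===== Notes on version B (the rewrite author's own statement) =====
-- stated objective: alternative
-- what changed: Drops A's dict of counts and decrementing score entirely: B counts first occurrences by a pairwise comparison against all earlier positions (no auxiliary container), incrementing from 0.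
import Mathlib
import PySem

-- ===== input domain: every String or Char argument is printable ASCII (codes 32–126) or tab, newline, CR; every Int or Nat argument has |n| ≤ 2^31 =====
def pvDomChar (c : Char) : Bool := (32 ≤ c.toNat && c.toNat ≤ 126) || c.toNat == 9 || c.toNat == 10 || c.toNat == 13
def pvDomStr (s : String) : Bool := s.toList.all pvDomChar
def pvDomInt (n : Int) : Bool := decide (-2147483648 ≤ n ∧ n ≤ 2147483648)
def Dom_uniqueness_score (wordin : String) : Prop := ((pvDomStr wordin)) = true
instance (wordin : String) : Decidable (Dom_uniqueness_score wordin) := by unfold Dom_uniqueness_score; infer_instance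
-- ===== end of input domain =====

-- B drops A's dict/counter: it counts first occurrences by comparing each of the five letters
-- against all earlier positions, with no auxiliary container (objective: alternative).

-- ===== PORT A =====
-- one loop iteration of A: the if/else on `wordin[i] in letters.keys()`
def pvStepA (st : Int × PySem.Dict Char Int) (c : Char) : Int × PySem.Dict Char Int :=
  if st.2.contains c then (st.1 - 1, st.2.modify c 0 (· + 1))
  else (st.1, st.2.insert c 1)

-- `wordin[i]`: pyGet?; the `.getD ' '` default is only reached outside Pre_ (where Python raises IndexError)
def uniqueness_score (wordin : String) : Int :=
  ((PySem.List.pyRange 0 5 1).foldl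
    (fun st i => pvStepA st ((PySem.Str.pyGet? wordin i).getD ' '))
    ((5 : Int), PySem.Dict.empty)).1

-- ===== PORT B =====
-- for i in range(5): if all(wordin[j] != wordin[i] for j in range(i)): score += 1
-- the `.getD ' '` default is only reached outside Pre_ (where Python raises IndexError)
def uniqueness_score_alt (wordin : String) : Int :=
  (PySem.List.pyRange 0 5 1).foldl
    (fun score i =>
      if (PySem.List.pyRange 0 i 1).all
          (fun j => ((PySem.Str.pyGet? wordin j).getD ' ') != ((PySem.Str.pyGet? wordin i).getD ' '))
      then score + 1 else score)
    0

-- ===== PRECONDITION & SPEC =====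
-- A raises IndexError on strings shorter than 5 characters; Pre_ excludes exactly those.
def Pre_uniqueness_score (wordin : String) : Prop := 5 ≤ wordin.toList.length
instance (wordin : String) : Decidable (Pre_uniqueness_score wordin) := by unfold Pre_uniqueness_score; infer_instance
def pvWitness_uniqueness_score : String := "hello"

def Spec_uniqueness_score (wordin : String) (out : Int) : Prop := out = uniqueness_score_alt wordin
instance (wordin : String) (out : Int) : Decidable (Spec_uniqueness_score wordin out) := by unfold Spec_uniqueness_score; infer_instance

-- ===== CLAIM (what is proved, stated in full; the proofs are below) =====
def Claim_equal_uniqueness_score : Prop := ∀ (wordin : String), Dom_uniqueness_score wordin → Pre_uniqueness_score wordin → Spec_uniqueness_score wordin (uniqueness_score wordin)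

-- ===== LEMMAS AND PROOFS =====

-- how many elements of cs are NOT yet seen, each new element counted once (A's score gain pattern)
def pvNewCount (cs : List Char) (ks : List Char) : Int :=
  match cs with
  | [] => 0
  | c :: t => if c ∈ ks then pvNewCount t ks else 1 + pvNewCount t (c :: ks)

-- B's counting pattern: seen prefix grows unconditionally (linear unfolding)
def pvCntB (cs : List Char) (pre : List Char) : Int :=
  match cs with
  | [] => 0
  | c :: t => (if c ∈ pre then 0 else 1) + pvCntB t (pre ++ [c])

theorem pvNewCount_congr (cs : List Char) (ks ks' : List Char)
    (h : ∀ x, x ∈ ks ↔ x ∈ ks') : pvNewCount cs ks = pvNewCount cs ks' := by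
  induction cs generalizing ks ks' with
  | nil => rfl
  | cons c t ih =>
    simp only [pvNewCount]
    by_cases hc : c ∈ ks
    · rw [if_pos hc, if_pos ((h c).mp hc)]; exact ih ks ks' h
    · rw [if_neg hc, if_neg (fun hc' => hc ((h c).mpr hc'))]
      have := ih (c :: ks) (c :: ks') (fun x => by simp [h x])
      omega

theorem pvFoldA (cs : List Char) (s : Int) (d : PySem.Dict Char Int) :
    (cs.foldl pvStepA (s, d)).1 = s - cs.length + pvNewCount cs d.keys := by
  induction cs generalizing s d with
  | nil => simp [pvNewCount]
  | cons c t ih =>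
    simp only [List.foldl_cons, pvStepA, pvNewCount]
    by_cases hc : c ∈ d.keys
    · have hcon : d.contains c = true := (PySem.Dict.contains_iff_mem_keys d c).mpr hc
      rw [if_pos hc]
      simp only [hcon, if_true, ih]
      rw [PySem.Dict.keys_modify, PySem.Dict.keys_insert_of_contains _ _ hcon]
      simp only [List.length_cons]; push_cast; omega
    · have hcon : d.contains c = false := by
        by_contra h
        exact hc ((PySem.Dict.contains_iff_mem_keys d c).mp (by revert h; cases d.contains c <;> simp))
      rw [if_neg hc]
      simp only [hcon, Bool.false_eq_true, if_false, ih]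
      rw [PySem.Dict.keys_insert_of_not_contains]
      · rw [pvNewCount_congr t (d.keys ++ [c]) (c :: d.keys) (fun x => by simp; tauto)]
        simp only [List.length_cons]
        push_cast; omega
      · exact hcon

theorem pvNewCount_eq_cntB (cs : List Char) (ks ks' : List Char)
    (h : ∀ x, x ∈ ks ↔ x ∈ ks') : pvNewCount cs ks = pvCntB cs ks' := by
  induction cs generalizing ks ks' with
  | nil => rfl
  | cons c t ih =>
    simp only [pvNewCount, pvCntB]
    by_cases hc : c ∈ ks
    · rw [if_pos hc, if_pos ((h c).mp hc)]
      have := ih ks (ks' ++ [c]) (fun x => by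
        simp only [List.mem_append, List.mem_singleton]
        constructor
        · intro hx; exact Or.inl ((h x).mp hx)
        · rintro (hx | rfl)
          · exact (h x).mpr hx
          · exact hc)
      omega
    · rw [if_neg hc, if_neg (fun hc' => hc ((h c).mpr hc'))]
      have := ih (c :: ks) (ks' ++ [c]) (fun x => by
        simp only [List.mem_cons, List.mem_append, h x]; tauto)
      omega

-- ===== VERDICT (by name: the statement is the Claim_ definition above) =====
set_option maxHeartbeats 1600000 in
theorem uniqueness_score_spec : Claim_equal_uniqueness_score := by
  intro wordin _ hpre
  unfold Spec_uniqueness_score uniqueness_score uniqueness_score_alt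
  have hlen : 5 ≤ wordin.toList.length := hpre
  have hx : ∀ (cs : List Char), 5 ≤ cs.length → ∃ a b c d e rest, cs = a :: b :: c :: d :: e :: rest := by
    intro cs h
    rcases cs with _ | ⟨a, _ | ⟨b, _ | ⟨c, _ | ⟨d, _ | ⟨e, rest⟩⟩⟩⟩⟩
    all_goals first
      | exact ⟨_, _, _, _, _, _, rfl⟩
      | simp at h
  obtain ⟨a, b, c, d, e, rest, hw⟩ := hx wordin.toList hlen
  have hget : ∀ (i : Nat) (h : i < wordin.toList.length),
      PySem.Str.pyGet? wordin (i : Int) = some (wordin.toList[i]) := by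
    intro i h; simp [List.getElem?_eq_getElem h]
  have h0 := hget 0 (by omega); have h1 := hget 1 (by omega)
  have h2 := hget 2 (by omega); have h3 := hget 3 (by omega)
  have h4 := hget 4 (by omega)
  simp only [hw] at h0 h1 h2 h3 h4
  simp only [List.getElem_cons_zero, List.getElem_cons_succ] at h0 h1 h2 h3 h4
  simp only [Nat.cast_ofNat, Nat.cast_one, Nat.cast_zero] at h0 h1 h2 h3 h4
  have hr : PySem.List.pyRange 0 5 1 = [0, 1, 2, 3, 4] := by decide
  have hr0 : PySem.List.pyRange 0 0 1 = [] := by decide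
  have hr1 : PySem.List.pyRange 0 1 1 = [0] := by decide
  have hr2 : PySem.List.pyRange 0 2 1 = [0, 1] := by decide
  have hr3 : PySem.List.pyRange 0 3 1 = [0, 1, 2] := by decide
  have hr4 : PySem.List.pyRange 0 4 1 = [0, 1, 2, 3] := by decide
  rw [hr]
  simp only [List.foldl_cons, List.foldl_nil, hr0, hr1, hr2, hr3, hr4,
    List.all_cons, List.all_nil, h0, h1, h2, h3, h4, Option.getD_some]
  have hA := pvFoldA [a, b, c, d, e] 5 PySem.Dict.empty
  rw [show (PySem.Dict.empty : PySem.Dict Char Int).keys = [] from rfl] at hA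
  simp only [List.foldl_cons, List.foldl_nil] at hA
  rw [hA, pvNewCount_eq_cntB [a, b, c, d, e] [] [] (fun _ => Iff.rfl)]
  simp only [pvCntB, List.nil_append, List.mem_cons, List.not_mem_nil,
    List.mem_append, or_false, if_false]
  simp only [Bool.and_eq_true, bne_iff_ne, ne_eq, and_true]
  have e1 : (¬ (a = b)) ↔ ¬ (b = a) := by constructor <;> intro h hh <;> exact h hh.symm
  have e2 : (¬ (a = c) ∧ ¬ (b = c)) ↔ ¬ (c = a ∨ c = b) := by
    constructor
    · rintro ⟨h1, h2⟩ (h | h)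
      · exact h1 h.symm
      · exact h2 h.symm
    · intro h; exact ⟨fun hh => h (Or.inl hh.symm), fun hh => h (Or.inr hh.symm)⟩
  have e3 : (¬ (a = d) ∧ ¬ (b = d) ∧ ¬ (c = d)) ↔ ¬ (d = a ∨ d = b ∨ d = c) := by
    constructor
    · rintro ⟨h1, h2, h3⟩ (h | h | h)
      · exact h1 h.symm
      · exact h2 h.symm
      · exact h3 h.symm
    · intro h
      exact ⟨fun hh => h (Or.inl hh.symm), fun hh => h (Or.inr (Or.inl hh.symm)),
        fun hh => h (Or.inr (Or.inr hh.symm))⟩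
  have e4 : (¬ (a = e) ∧ ¬ (b = e) ∧ ¬ (c = e) ∧ ¬ (d = e)) ↔ ¬ (e = a ∨ e = b ∨ e = c ∨ e = d) := by
    constructor
    · rintro ⟨h1, h2, h3, h4⟩ (h | h | h | h)
      · exact h1 h.symm
      · exact h2 h.symm
      · exact h3 h.symm
      · exact h4 h.symm
    · intro h
      exact ⟨fun hh => h (Or.inl hh.symm), fun hh => h (Or.inr (Or.inl hh.symm)),
        fun hh => h (Or.inr (Or.inr (Or.inl hh.symm))),
        fun hh => h (Or.inr (Or.inr (Or.inr hh.symm)))⟩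
  simp only [e1, e2, e3, e4]
  by_cases q1 : b = a <;> by_cases q2 : c = a ∨ c = b <;>
    by_cases q3 : d = a ∨ d = b ∨ d = c <;> by_cases q4 : e = a ∨ e = b ∨ e = c ∨ e = d <;>
    simp_all [or_assoc]
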